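-- pv_equiv track=rewrite | github.com/bryan967132/IPC2_Proyecto1_201908355 | princF.py | cantDescart
-- ===== SOURCE A (Python) =====
-- def cantDescart(lenPreOpt,t,preOpt,rutas):
--     cant = 0
--     i = 0
--     while i < lenPreOpt:
--         x = 0
--         while x < t:
--             if (preOpt.get(i,0) == rutas.get(x,0) and preOpt.get(i,1) == rutas.get(x,1)) or (preOpt.get(i,0) == rutas.get(x,2) and preOpt.get(i,1) == rutas.get(x,3)):
--                 cant += 1
--             x += 1
--         i += 1
--     return cant
-- ===== SOURCE B (Python) =====
-- def cantDescart(lenPreOpt, t, preOpt, rutas):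
--     tt = t if t > 0 else 0
--     n = lenPreOpt if lenPreOpt > 0 else 0
--     cnt = {}
--     inRutas = 0
--     for k, v in rutas.items():
--         if 0 <= k < t:
--             inRutas += 1
--             cnt[v] = cnt.get(v, 0) + 1
--     missR = tt - inRutas
--     total = 0
--     inPre = 0
--     for k, v in preOpt.items():
--         if 0 <= k < lenPreOpt:
--             inPre += 1
--             total += cnt.get(v, 0)
--     total += (n - inPre) * missR
--     return total
-- ===== Notes on version B (the rewrite author's own statement) =====
-- stated objective: faster
-- what changed: B replaces the nested range(lenPreOpt) x range(t) scan by one pass over rutas building a counter of in-range values (plus a miss count) and one pass over preOpt looking each value up, exploiting that a pair matches iff both keys are present with equal values or both keys are absent.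
import Mathlib
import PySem

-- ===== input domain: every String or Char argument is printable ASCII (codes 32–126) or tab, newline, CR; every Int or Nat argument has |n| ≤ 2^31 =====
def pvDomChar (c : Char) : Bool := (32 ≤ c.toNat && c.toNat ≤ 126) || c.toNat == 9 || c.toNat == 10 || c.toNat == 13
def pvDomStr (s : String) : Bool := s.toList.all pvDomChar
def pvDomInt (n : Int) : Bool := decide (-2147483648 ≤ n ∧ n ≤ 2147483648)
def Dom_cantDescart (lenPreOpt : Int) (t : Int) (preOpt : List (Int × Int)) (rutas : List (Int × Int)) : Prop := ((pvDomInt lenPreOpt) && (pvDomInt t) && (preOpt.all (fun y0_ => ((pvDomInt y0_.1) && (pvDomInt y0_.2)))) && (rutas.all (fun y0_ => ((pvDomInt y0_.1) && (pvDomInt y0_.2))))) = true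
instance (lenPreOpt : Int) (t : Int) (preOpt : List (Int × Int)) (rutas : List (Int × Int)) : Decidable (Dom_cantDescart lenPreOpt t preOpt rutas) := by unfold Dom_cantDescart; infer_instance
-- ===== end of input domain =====

-- B replaces A's nested range(lenPreOpt) × range(t) scan by a counter of in-range ruta
-- values plus one lookup pass over preOpt (objective: faster, asymptotic).

-- ===== PORT A =====
def cantDescart (lenPreOpt : Int) (t : Int) (preOpt : List (Int × Int)) (rutas : List (Int × Int)) : Int :=
  (PySem.List.pyRange 0 lenPreOpt 1).foldl (fun cant i =>
    (PySem.List.pyRange 0 t 1).foldl (fun cant x =>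
      if ((PySem.Dict.mk preOpt).getD i 0 == (PySem.Dict.mk rutas).getD x 0 &&
          (PySem.Dict.mk preOpt).getD i 1 == (PySem.Dict.mk rutas).getD x 1) ||
         ((PySem.Dict.mk preOpt).getD i 0 == (PySem.Dict.mk rutas).getD x 2 &&
          (PySem.Dict.mk preOpt).getD i 1 == (PySem.Dict.mk rutas).getD x 3)
      then cant + 1 else cant) cant) 0

-- ===== PORT B =====
def cantDescart_alt (lenPreOpt : Int) (t : Int) (preOpt : List (Int × Int)) (rutas : List (Int × Int)) : Int :=
  let tt : Int := if t > 0 then t else 0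
  let n : Int := if lenPreOpt > 0 then lenPreOpt else 0
  let s : PySem.Dict Int Int × Int := rutas.foldl (fun s kv =>
      if 0 ≤ kv.1 ∧ kv.1 < t then (s.1.insert kv.2 (s.1.getD kv.2 0 + 1), s.2 + 1) else s)
      (PySem.Dict.empty, 0)
  let missR : Int := tt - s.2
  let r : Int × Int := preOpt.foldl (fun r kv =>
      if 0 ≤ kv.1 ∧ kv.1 < lenPreOpt then (r.1 + s.1.getD kv.2 0, r.2 + 1) else r)
      (0, 0)
  r.1 + (n - r.2) * missR

-- ===== PRECONDITION & SPEC =====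
-- Pre_ only requires the association lists to have pairwise distinct keys, which every
-- Python dict guarantees, so no input the Python A accepts is excluded.
def Pre_cantDescart (lenPreOpt : Int) (t : Int) (preOpt : List (Int × Int)) (rutas : List (Int × Int)) : Prop :=
  (preOpt.map Prod.fst).Nodup ∧ (rutas.map Prod.fst).Nodup
instance (lenPreOpt : Int) (t : Int) (preOpt : List (Int × Int)) (rutas : List (Int × Int)) : Decidable (Pre_cantDescart lenPreOpt t preOpt rutas) := by unfold Pre_cantDescart; infer_instance
def pvWitness_cantDescart : Int × Int × (List (Int × Int)) × (List (Int × Int)) := (2, 2, [(0, 5), (1, 7)], [(0, 5), (1, 3)])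

def Spec_cantDescart (lenPreOpt : Int) (t : Int) (preOpt : List (Int × Int)) (rutas : List (Int × Int)) (out : Int) : Prop := out = cantDescart_alt lenPreOpt t preOpt rutas
instance (lenPreOpt : Int) (t : Int) (preOpt : List (Int × Int)) (rutas : List (Int × Int)) (out : Int) : Decidable (Spec_cantDescart lenPreOpt t preOpt rutas out) := by unfold Spec_cantDescart; infer_instance

-- ===== CLAIM (what is proved, stated in full; the proofs are below) =====
def Claim_equal_cantDescart : Prop := ∀ (lenPreOpt : Int) (t : Int) (preOpt : List (Int × Int)) (rutas : List (Int × Int)), Dom_cantDescart lenPreOpt t preOpt rutas → Pre_cantDescart lenPreOpt t preOpt rutas → Spec_cantDescart lenPreOpt t preOpt rutas (cantDescart lenPreOpt t preOpt rutas)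

-- ===== LEMMAS AND PROOFS =====

-- the match test of A, seen through get?: both present with equal values, or both absent
def pvPB : Option Int → Option Int → Bool
  | some a, some b => a == b
  | none, none => true
  | _, _ => false

-- number of in-range rutas entries holding value v
def pvRv (rutas : List (Int × Int)) (t v : Int) : Int :=
  ((rutas.filter (fun kv => decide (0 ≤ kv.1 ∧ kv.1 < t))).countP (fun kv => kv.2 == v) : Int)

-- number of x ∈ [0,t) that are not rutas keys
def pvMs (rutas : List (Int × Int)) (t : Int) : Int :=
  max t 0 - ((rutas.countP (fun kv => decide (0 ≤ kv.1 ∧ kv.1 < t))) : Int)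

def pvFr (rutas : List (Int × Int)) (t : Int) : Option Int → Int
  | some a => pvRv rutas t a
  | none => pvMs rutas t

theorem pv_cond_eq (d1 d2 : PySem.Dict Int Int) (i x : Int) :
    ((d1.getD i 0 == d2.getD x 0 && d1.getD i 1 == d2.getD x 1) ||
     (d1.getD i 0 == d2.getD x 2 && d1.getD i 1 == d2.getD x 3))
    = pvPB (d1.get? i) (d2.get? x) := by
  simp only [PySem.Dict.getD_eq_get?_getD]
  rcases d1.get? i with _ | a <;> rcases d2.get? x with _ | b <;>
    simp [pvPB, Option.getD] <;> omega

theorem pv_sum_map_diff_one {l : List Int} (hnd : l.Nodup) {k : Int} (hk : k ∈ l)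
    (f g : Int → Int) (hfg : ∀ x ∈ l, x ≠ k → f x = g x) :
    (l.map f).sum = (l.map g).sum + f k - g k := by
  have hperm : List.Perm l (k :: l.erase k) := List.perm_cons_erase hk
  have hf := (hperm.map f).sum_eq
  have hg := (hperm.map g).sum_eq
  have herase : ((l.erase k).map f).sum = ((l.erase k).map g).sum := by
    have : (l.erase k).map f = (l.erase k).map g := by
      apply List.map_congr_left
      intro x hx
      rcases (List.Nodup.mem_erase_iff hnd).1 hx with ⟨hne, hmem⟩
      exact hfg x hmem hne
    rw [this]
  simp only [List.map_cons, List.sum_cons] at hf hg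
  omega

-- summing F over the dict lookups of range(n): misses contribute F none, hits F (some v)
theorem pv_sum_map_get? (d : List (Int × Int)) (hnd : (d.map Prod.fst).Nodup)
    (n : Int) (F : Option Int → Int) :
    ((PySem.List.pyRange 0 n 1).map (fun i => F ((PySem.Dict.mk d).get? i))).sum
    = max n 0 * F none
      + ((d.filter (fun kv => decide (0 ≤ kv.1 ∧ kv.1 < n))).map
          (fun kv => F (some kv.2) - F none)).sum := by
  induction d with
  | nil =>
    have hget : ∀ i : Int, (PySem.Dict.mk ([] : List (Int × Int))).get? i = none := by
      intro i; rfl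
    simp only [hget, List.filter_nil, List.map_nil, List.sum_nil, add_zero]
    rw [PySem.List.sum_map_const_int, PySem.List.length_pyRange_one,
       show (((n - 0).toNat : Int)) = max n 0 by omega]
  | cons kv rest ih =>
    rw [List.map_cons] at hnd
    have hnotmem : kv.1 ∉ rest.map Prod.fst := (List.nodup_cons.1 hnd).1
    have hndrest : (rest.map Prod.fst).Nodup := (List.nodup_cons.1 hnd).2
    have hrestk : (PySem.Dict.mk rest).get? kv.1 = none := by
      rw [PySem.Dict.get?_eq_none_iff_not_mem_keys]
      simpa [PySem.Dict.keys] using hnotmem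
    have hcons : ∀ i : Int, (PySem.Dict.mk (kv :: rest)).get? i
        = if kv.1 == i then some kv.2 else (PySem.Dict.mk rest).get? i := by
      intro i; exact PySem.Dict.get?_mk_cons kv.1 kv.2 rest i
    simp only [hcons]
    by_cases hk : 0 ≤ kv.1 ∧ kv.1 < n
    · have hmem : kv.1 ∈ PySem.List.pyRange 0 n 1 := by
        rw [PySem.List.mem_pyRange_one]; omega
      have hdiff := pv_sum_map_diff_one (PySem.List.nodup_pyRange_one 0 n)
        hmem (fun i => F (if kv.1 == i then some kv.2 else (PySem.Dict.mk rest).get? i))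
        (fun i => F ((PySem.Dict.mk rest).get? i))
        (by intro x hx hne
            have : (kv.1 == x) = false := by simpa using (Ne.symm hne)
            simp [this])
      rw [hdiff, ih hndrest]
      simp only [beq_self_eq_true, if_true, hrestk]
      rw [List.filter_cons_of_pos (by simpa using hk)]
      simp only [List.map_cons, List.sum_cons]
      ring
    · have hcong : (PySem.List.pyRange 0 n 1).map
          (fun i => F (if kv.1 == i then some kv.2 else (PySem.Dict.mk rest).get? i))
          = (PySem.List.pyRange 0 n 1).map (fun i => F ((PySem.Dict.mk rest).get? i)) := by
        apply List.map_congr_left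
        intro x hx
        have hxr := PySem.List.mem_pyRange_one.1 hx
        have : (kv.1 == x) = false := by
          simp only [beq_eq_false_iff_ne]; intro h; exact hk (by omega)
        simp [this]
      rw [hcong, ih hndrest, List.filter_cons_of_neg (by simpa using hk)]

theorem pv_sum_ite (a : Int) : ∀ l : List (Int × Int),
    (l.map (fun kv => if a = kv.2 then (1:Int) else 0)).sum
    = (l.countP (fun kv => kv.2 == a) : Int)
  | [] => by simp
  | kv :: r => by
    simp only [List.map_cons, List.sum_cons, List.countP_cons, pv_sum_ite a r]
    by_cases h : a = kv.2
    · simp only [h, beq_self_eq_true, if_pos]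
      push_cast; ring
    · have hb : (kv.2 == a) = false := by simp [Ne.symm h]
      simp only [h, hb, if_false, Bool.false_eq_true]
      push_cast; ring

-- A's inner loop count, characterised through preOpt.get? i
theorem pv_inner (preOpt rutas : List (Int × Int))
    (hndr : (rutas.map Prod.fst).Nodup) (t i : Int) :
    (((PySem.List.pyRange 0 t 1).countP (fun x =>
        ((PySem.Dict.mk preOpt).getD i 0 == (PySem.Dict.mk rutas).getD x 0 &&
         (PySem.Dict.mk preOpt).getD i 1 == (PySem.Dict.mk rutas).getD x 1) ||
        ((PySem.Dict.mk preOpt).getD i 0 == (PySem.Dict.mk rutas).getD x 2 &&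
         (PySem.Dict.mk preOpt).getD i 1 == (PySem.Dict.mk rutas).getD x 3))) : Int)
    = pvFr rutas t ((PySem.Dict.mk preOpt).get? i) := by
  have hcnt : ∀ p : Int → Bool, (((PySem.List.pyRange 0 t 1).countP p) : Int)
      = ((PySem.List.pyRange 0 t 1).map (fun x => if p x then (1 : Int) else 0)).sum := by
    intro p; rw [PySem.List.sum_map_ite_one_zero]
  rw [show (fun x : Int =>
        ((PySem.Dict.mk preOpt).getD i 0 == (PySem.Dict.mk rutas).getD x 0 &&
         (PySem.Dict.mk preOpt).getD i 1 == (PySem.Dict.mk rutas).getD x 1) ||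
        ((PySem.Dict.mk preOpt).getD i 0 == (PySem.Dict.mk rutas).getD x 2 &&
         (PySem.Dict.mk preOpt).getD i 1 == (PySem.Dict.mk rutas).getD x 3))
      = fun x : Int => pvPB ((PySem.Dict.mk preOpt).get? i) ((PySem.Dict.mk rutas).get? x)
      from funext fun x => pv_cond_eq _ _ i x]
  rw [hcnt]
  rw [pv_sum_map_get? rutas hndr t
      (fun o => if pvPB ((PySem.Dict.mk preOpt).get? i) o then (1 : Int) else 0)]
  rcases (PySem.Dict.mk preOpt).get? i with _ | a
  · simp only [pvPB, pvFr]
    norm_num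
    unfold pvMs
    rw [List.countP_eq_length_filter]
    simp only [Bool.decide_and]
    omega
  · simp only [pvPB, pvFr]
    norm_num
    unfold pvRv
    simp only [Bool.decide_and]
    exact pv_sum_ite a _

-- B's counter dict holds, at v, the number of in-range rutas entries with value v
theorem pv_getD_counter (rutas : List (Int × Int)) (t v : Int) :
    (rutas.foldl (fun (d : PySem.Dict Int Int) kv =>
        if 0 ≤ kv.1 ∧ kv.1 < t then d.insert kv.2 (d.getD kv.2 0 + 1) else d)
      PySem.Dict.empty).getD v 0 = pvRv rutas t v := by
  rw [PySem.List.foldl_ite_eq_foldl_filter]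
  rw [show (rutas.filter (fun kv => decide (0 ≤ kv.1 ∧ kv.1 < t))).foldl
        (fun (d : PySem.Dict Int Int) kv => d.insert kv.2 (d.getD kv.2 0 + 1))
        PySem.Dict.empty
      = ((rutas.filter (fun kv => decide (0 ≤ kv.1 ∧ kv.1 < t))).map Prod.snd).foldl
        (fun (d : PySem.Dict Int Int) w => d.insert w (d.getD w 0 + 1))
        PySem.Dict.empty
      from by rw [List.foldl_map]]
  rw [PySem.Dict.getD_foldl_insert_add_one]
  simp only [PySem.Dict.getD_empty, List.count, List.countP_map, pvRv, zero_add]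
  rfl

theorem pv_A_eq (n t : Int) (preOpt rutas : List (Int × Int))
    (hndp : (preOpt.map Prod.fst).Nodup) (hndr : (rutas.map Prod.fst).Nodup) :
    cantDescart n t preOpt rutas
    = max n 0 * pvMs rutas t
      + ((preOpt.filter (fun kv => decide (0 ≤ kv.1 ∧ kv.1 < n))).map
          (fun kv => pvRv rutas t kv.2 - pvMs rutas t)).sum := by
  unfold cantDescart
  rw [show (fun (cant i : Int) =>
      (PySem.List.pyRange 0 t 1).foldl (fun cant y =>
        if ((PySem.Dict.mk preOpt).getD i 0 == (PySem.Dict.mk rutas).getD y 0 &&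
            (PySem.Dict.mk preOpt).getD i 1 == (PySem.Dict.mk rutas).getD y 1) ||
           ((PySem.Dict.mk preOpt).getD i 0 == (PySem.Dict.mk rutas).getD y 2 &&
            (PySem.Dict.mk preOpt).getD i 1 == (PySem.Dict.mk rutas).getD y 3)
        then cant + 1 else cant) cant)
      = (fun (cant i : Int) => cant + pvFr rutas t ((PySem.Dict.mk preOpt).get? i))
      from funext fun cant => funext fun i => by
        rw [PySem.List.foldl_if_add_one, pv_inner preOpt rutas hndr t i]]
  rw [PySem.List.foldl_add (g := fun i => pvFr rutas t ((PySem.Dict.mk preOpt).get? i))]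
  rw [pv_sum_map_get? preOpt hndp n (pvFr rutas t)]
  simp [pvFr]

theorem pv_B_eq (n t : Int) (preOpt rutas : List (Int × Int)) :
    cantDescart_alt n t preOpt rutas
    = ((preOpt.filter (fun kv => decide (0 ≤ kv.1 ∧ kv.1 < n))).map
        (fun kv => pvRv rutas t kv.2)).sum
      + (max n 0 - (preOpt.countP (fun kv => decide (0 ≤ kv.1 ∧ kv.1 < n)) : Int))
          * pvMs rutas t := by
  show (let tt : Int := if t > 0 then t else 0
        let n' : Int := if n > 0 then n else 0
        let s : PySem.Dict Int Int × Int := rutas.foldl (fun s kv =>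
            if 0 ≤ kv.1 ∧ kv.1 < t then (s.1.insert kv.2 (s.1.getD kv.2 0 + 1), s.2 + 1) else s)
            (PySem.Dict.empty, 0)
        let missR : Int := tt - s.2
        let r : Int × Int := preOpt.foldl (fun r kv =>
            if 0 ≤ kv.1 ∧ kv.1 < n then (r.1 + s.1.getD kv.2 0, r.2 + 1) else r)
            (0, 0)
        r.1 + (n' - r.2) * missR) = _
  simp only []
  rw [show (fun (s : PySem.Dict Int Int × Int) (kv : Int × Int) =>
        if 0 ≤ kv.1 ∧ kv.1 < t then (s.1.insert kv.2 (s.1.getD kv.2 0 + 1), s.2 + 1) else s)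
      = (fun s kv => ((if 0 ≤ kv.1 ∧ kv.1 < t then s.1.insert kv.2 (s.1.getD kv.2 0 + 1) else s.1),
                      (if 0 ≤ kv.1 ∧ kv.1 < t then s.2 + 1 else s.2)))
      from funext fun s => funext fun kv => by
        by_cases h : 0 ≤ kv.1 ∧ kv.1 < t <;> simp [h]]
  rw [PySem.List.foldl_prod_mk
      (f := fun (d : PySem.Dict Int Int) (kv : Int × Int) =>
        if 0 ≤ kv.1 ∧ kv.1 < t then d.insert kv.2 (d.getD kv.2 0 + 1) else d)
      (g := fun (c : Int) (kv : Int × Int) =>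
        if 0 ≤ kv.1 ∧ kv.1 < t then c + 1 else c)]
  simp only []
  rw [show (fun (r : Int × Int) (kv : Int × Int) =>
        if 0 ≤ kv.1 ∧ kv.1 < n then (r.1 + (rutas.foldl (fun (d : PySem.Dict Int Int) kv =>
            if 0 ≤ kv.1 ∧ kv.1 < t then d.insert kv.2 (d.getD kv.2 0 + 1) else d)
          PySem.Dict.empty).getD kv.2 0, r.2 + 1) else r)
      = (fun r kv => ((if 0 ≤ kv.1 ∧ kv.1 < n then r.1 + (rutas.foldl (fun (d : PySem.Dict Int Int) kv =>
            if 0 ≤ kv.1 ∧ kv.1 < t then d.insert kv.2 (d.getD kv.2 0 + 1) else d)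
          PySem.Dict.empty).getD kv.2 0 else r.1),
                      (if 0 ≤ kv.1 ∧ kv.1 < n then r.2 + 1 else r.2)))
      from funext fun r => funext fun kv => by
        by_cases h : 0 ≤ kv.1 ∧ kv.1 < n <;> simp [h]]
  rw [PySem.List.foldl_prod_mk
      (f := fun (acc : Int) (kv : Int × Int) =>
        if 0 ≤ kv.1 ∧ kv.1 < n then acc + (rutas.foldl (fun (d : PySem.Dict Int Int) kv =>
            if 0 ≤ kv.1 ∧ kv.1 < t then d.insert kv.2 (d.getD kv.2 0 + 1) else d)
          PySem.Dict.empty).getD kv.2 0 else acc)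
      (g := fun (c : Int) (kv : Int × Int) =>
        if 0 ≤ kv.1 ∧ kv.1 < n then c + 1 else c)]
  simp only []
  rw [PySem.List.foldl_ite_add_one, PySem.List.foldl_ite_add_one]
  rw [PySem.List.foldl_ite_eq_foldl_filter
      (p := fun kv : Int × Int => 0 ≤ kv.1 ∧ kv.1 < n)]
  rw [PySem.List.foldl_add (g := fun kv : Int × Int => (rutas.foldl (fun (d : PySem.Dict Int Int) kv =>
        if 0 ≤ kv.1 ∧ kv.1 < t then d.insert kv.2 (d.getD kv.2 0 + 1) else d)
      PySem.Dict.empty).getD kv.2 0)]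
  rw [List.map_congr_left (fun (kv : Int × Int) _ => pv_getD_counter rutas t kv.2)]
  rw [show (if t > 0 then t else 0) = max t 0 from by by_cases h : t > 0 <;> simp [h] <;> omega]
  rw [show (if n > 0 then n else 0) = max n 0 from by by_cases h : n > 0 <;> simp [h] <;> omega]
  unfold pvMs
  ring

-- ===== VERDICT (by name: the statement is the Claim_ definition above) =====
theorem cantDescart_spec : Claim_equal_cantDescart := by
  intro n t preOpt rutas _ hpre
  obtain ⟨hndp, hndr⟩ := hpre
  unfold Spec_cantDescart
  rw [pv_A_eq n t preOpt rutas hndp hndr, pv_B_eq n t preOpt rutas]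
  rw [show (fun kv : Int × Int => pvRv rutas t kv.2 - pvMs rutas t)
      = fun kv : Int × Int => pvRv rutas t kv.2 + (-pvMs rutas t)
      from funext fun kv => by ring]
  rw [PySem.List.sum_map_add_int
      (f := fun kv : Int × Int => pvRv rutas t kv.2)
      (g := fun _ : Int × Int => -pvMs rutas t)]
  rw [PySem.List.sum_map_const_int]
  rw [List.countP_eq_length_filter]
  ring
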